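-- pv_equiv track=rewrite | github.com/Mazhar004/python-tools | specs_device.py | date_format
-- ===== SOURCE A (Python) =====
-- date_index = [[365, 'year'], [30, 'month'], [1, 'day']]
--
-- def date_format(val, index=0, str_val=''):
--     # Convert dat time object to string
--     if index < 3:
--         divisor, name = date_index[index]
--         quotient = val//divisor
--         if quotient:
--             str_val += f" {quotient} {name}"
--         str_val = date_format(val % divisor, index+1, str_val)
--     return str_val
-- ===== SOURCE B (Python) =====
-- date_index = [[365, 'year'], [30, 'month'], [1, 'day']]
--
-- def date_format(val, index=0, str_val=''):
--     # Collect the formatted pieces in a list, then join them once at the end.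
--     pieces = []
--     while index < 3:
--         divisor, name = date_index[index]
--         quotient, val = divmod(val, divisor)
--         if quotient:
--             pieces.append(f" {quotient} {name}")
--         index += 1
--     return str_val + "".join(pieces)
-- ===== Notes on version B (the rewrite author's own statement) =====
-- stated objective: simpler
-- what changed: Replaced the self-recursive accumulator-threading function with a while loop that divmod-splits val, collects the formatted pieces in a list and joins them onto str_val once at the end.
import Mathlib
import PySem

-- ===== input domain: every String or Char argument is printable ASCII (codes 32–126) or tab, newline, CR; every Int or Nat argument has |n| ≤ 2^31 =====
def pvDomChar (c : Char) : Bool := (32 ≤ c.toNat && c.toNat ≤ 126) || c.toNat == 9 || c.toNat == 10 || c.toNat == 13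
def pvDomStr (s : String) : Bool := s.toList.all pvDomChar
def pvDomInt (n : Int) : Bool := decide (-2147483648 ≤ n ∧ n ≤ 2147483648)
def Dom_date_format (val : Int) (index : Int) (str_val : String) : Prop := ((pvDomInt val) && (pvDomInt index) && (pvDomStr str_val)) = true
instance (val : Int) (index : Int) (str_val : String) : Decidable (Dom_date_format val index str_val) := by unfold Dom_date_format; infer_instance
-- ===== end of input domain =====

-- B replaces A's accumulator-threading recursion by a while loop that divmod-splits val,
-- collects the formatted pieces in a list and joins them once at the end; objective: simpler.

-- module-level date_index table (shared constant of the module)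
def pvDateIndex : List (Int × String) := [(365, "year"), (30, "month"), (1, "day")]

-- ===== PORT A =====
def date_format (val : Int) (index : Int) (str_val : String) : String :=
  if _h : index < 3 then
    match PySem.List.pyGet? pvDateIndex index with
    | none => str_val  -- IndexError in Python; excluded by Pre_date_format
    | some (divisor, name) =>
      let quotient := PySem.Int.floordiv val divisor
      let str_val' := if quotient ≠ 0 then str_val ++ " " ++ PySem.Int.toStr quotient ++ " " ++ name else str_val
      date_format (PySem.Int.mod val divisor) (index + 1) str_val'
  else str_val
termination_by (3 - index).toNat
decreasing_by omega

-- ===== PORT B =====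
-- the while loop of Source B: builds the list `pieces` (val and index are the mutated locals)
def pvPieces (val : Int) (index : Int) : List String :=
  if _h : index < 3 then
    match PySem.List.pyGet? pvDateIndex index with
    | none => []  -- IndexError in Python; excluded by Pre_date_format
    | some (divisor, name) =>
      match PySem.Int.divmod? val divisor with
      | none => []  -- ZeroDivisionError; unreachable, all table divisors are nonzero
      | some (quotient, rest) =>
        (if quotient ≠ 0 then [" " ++ PySem.Int.toStr quotient ++ " " ++ name] else [])
          ++ pvPieces rest (index + 1)
  else []
termination_by (3 - index).toNat
decreasing_by omega

def date_format_alt (val : Int) (index : Int) (str_val : String) : String :=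
  str_val ++ String.join (pvPieces val index)

-- ===== PRECONDITION & SPEC =====
-- Pre_ excludes index ≤ -4, where Python's date_index[index] raises IndexError in both A and B.
def Pre_date_format (val : Int) (index : Int) (str_val : String) : Prop := -3 ≤ index
instance (val : Int) (index : Int) (str_val : String) : Decidable (Pre_date_format val index str_val) := by unfold Pre_date_format; infer_instance
def pvWitness_date_format : Int × Int × String := (400, 0, "")

def Spec_date_format (val : Int) (index : Int) (str_val : String) (out : String) : Prop := out = date_format_alt val index str_val
instance (val : Int) (index : Int) (str_val : String) (out : String) : Decidable (Spec_date_format val index str_val out) := by unfold Spec_date_format; infer_instance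

-- ===== CLAIM =====
def Claim_equal_date_format : Prop := ∀ (val : Int) (index : Int) (str_val : String), Dom_date_format val index str_val → Pre_date_format val index str_val → Spec_date_format val index str_val (date_format val index str_val)

-- ===== LEMMAS AND PROOFS =====

lemma date_format_eq (index : Int) (h : -3 ≤ index) (val : Int) (s : String) :
    date_format val index s = s ++ String.join (pvPieces val index) := by
  by_cases h3 : index < 3
  · interval_cases index <;>
      simp [date_format, pvPieces, pvDateIndex, String.join,
            PySem.List.pyGet?, PySem.List.pyIdx?, PySem.Int.divmod?,
            PySem.Int.floordiv, PySem.Int.mod] <;>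
      split_ifs <;>
      simp_all [← String.toList_inj]
  · rw [date_format, pvPieces]
    simp [h3, String.join]

-- ===== VERDICT =====
theorem date_format_spec : Claim_equal_date_format := by
  intro val index s _ hpre
  exact date_format_eq index hpre val s
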